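-- pv_equiv track=rewrite | github.com/SuperInstance/forgemaster | research/eisenstein-triples/verify_proofs.py | get_orbit
-- ===== SOURCE A (Python) =====
-- def get_orbit(coloring):
--     """Apply all 12 D6 symmetries (6 rotations × 2 for reflection)."""
--     orbits = set()
--     # Rotations by 60°: index i → (i+k) % 6
--     for k in range(6):
--         rotated = frozenset((i + k) % 6 for i in coloring)
--         orbits.add(rotated)
--         # Reflection (reverse order): index i → (-i + k) % 6
--         reflected = frozenset((-i + k) % 6 for i in coloring)
--         orbits.add(reflected)
--     return frozenset(orbits)
-- ===== SOURCE B (Python) =====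
-- def get_orbit(coloring):
--     """Apply all 12 D6 symmetries: map the input once, then iterate the rotation generator."""
--     def rotate(c):
--         return frozenset((v + 1) % 6 for v in c)
--     x = frozenset(i % 6 for i in coloring)
--     y = frozenset(-v % 6 for v in x)
--     orbit = set()
--     for _ in range(6):
--         orbit.add(x)
--         orbit.add(y)
--         x = rotate(x)
--         y = rotate(y)
--     return frozenset(orbit)
-- ===== Notes on version B (the rewrite author's own statement) =====
-- stated objective: faster
-- what changed: B maps the input coloring mod 6 once, computes its mirror, and generates the remaining orbit members by repeatedly applying the rotation generator to the previous (at most 6-element) images, instead of re-mapping the whole input for each of the 12 symmetries.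
import Mathlib
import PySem

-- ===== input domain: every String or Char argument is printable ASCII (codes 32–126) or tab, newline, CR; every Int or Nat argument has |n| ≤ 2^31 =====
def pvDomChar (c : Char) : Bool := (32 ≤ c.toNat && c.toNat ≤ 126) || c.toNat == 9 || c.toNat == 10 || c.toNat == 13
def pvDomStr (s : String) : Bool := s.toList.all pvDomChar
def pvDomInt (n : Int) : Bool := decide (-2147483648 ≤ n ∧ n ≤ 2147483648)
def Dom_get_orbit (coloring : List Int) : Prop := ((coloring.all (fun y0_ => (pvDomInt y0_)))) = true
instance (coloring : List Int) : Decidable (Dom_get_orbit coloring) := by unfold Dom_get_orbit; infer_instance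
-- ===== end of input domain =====

-- B maps the input once and generates the remaining orbit members by iterating the rotation
-- generator on the 6-element images (objective: faster — one pass over the input instead of 12).

-- Shared helper: Python's `set.add` on a set of FROZENSETS — membership is frozenset (set)
-- equality, so it is ported by hand with PySem.Set.equal (exact: Python compares frozensets
-- as sets; insertion order of the outer set is kept, as PySem.Set does).
def fsetAdd (s : List (List Int)) (x : List Int) : List (List Int) :=
  if s.any (fun t => PySem.Set.equal t x) then s else s ++ [x]

-- ===== PORT A =====
-- orbits = set(); for k in range(6): orbits.add(frozenset((i+k)%6 …)); orbits.add(frozenset((-i+k)%6 …));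
-- the final `return frozenset(orbits)` rebuilds the same set of frozensets: identity on the port.
def get_orbit (coloring : List Int) : List (List Int) :=
  (PySem.List.pyRange 0 6 1).foldl
    (fun orbits k =>
      let rotated : List Int := PySem.Set.ofList (coloring.map (fun i => PySem.Int.mod (i + k) 6))
      let orbits1 := fsetAdd orbits rotated
      let reflected : List Int := PySem.Set.ofList (coloring.map (fun i => PySem.Int.mod (-i + k) 6))
      fsetAdd orbits1 reflected)
    []

-- ===== PORT B =====
-- rotate(c) = frozenset((v+1)%6 for v in c)
def pvRotate (c : List Int) : List Int :=
  PySem.Set.ofList (c.map (fun v => PySem.Int.mod (v + 1) 6))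

-- x = frozenset(i%6 …); y = frozenset(-v%6 for v in x); 6× (add x; add y; x, y := rotate x, rotate y)
def get_orbit_alt (coloring : List Int) : List (List Int) :=
  let x0 : List Int := PySem.Set.ofList (coloring.map (fun i => PySem.Int.mod i 6))
  let y0 : List Int := PySem.Set.ofList (x0.map (fun v => PySem.Int.mod (-v) 6))
  ((PySem.List.pyRange 0 6 1).foldl
    (fun st _ => (fsetAdd (fsetAdd st.1 st.2.1) st.2.2, pvRotate st.2.1, pvRotate st.2.2))
    (([] : List (List Int)), x0, y0)).1

-- ===== PRECONDITION & SPEC =====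
def Spec_get_orbit (coloring : List Int) (out : List (List Int)) : Prop := out = get_orbit_alt coloring
instance (coloring : List Int) (out : List (List Int)) : Decidable (Spec_get_orbit coloring out) := by unfold Spec_get_orbit; infer_instance

-- ===== CLAIM (what is proved, stated in full; the proofs are below) =====
def Claim_equal_get_orbit : Prop := ∀ (coloring : List Int), Dom_get_orbit coloring → Spec_get_orbit coloring (get_orbit coloring)

-- ===== LEMMAS AND PROOFS =====

-- foldl over Set.add of a Nodup list disjoint from the accumulator is plain append
theorem foldl_add_nodup (l : List Int) : ∀ (acc : List Int), l.Nodup → (∀ x ∈ l, x ∉ acc) →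
    List.foldl PySem.Set.add acc l = acc ++ l := by
  induction l with
  | nil => intro acc _ _; simp
  | cons x t ih =>
    intro acc hnd hdisj
    have hx : x ∉ acc := hdisj x (by simp)
    have hstep : PySem.Set.add acc x = acc ++ [x] := by
      simp [PySem.Set.add, PySem.Set.contains, hx]
    rw [List.foldl_cons, hstep, ih (acc ++ [x]) (List.Nodup.of_cons hnd)]
    · simp
    · intro y hy
      simp only [List.mem_append, List.mem_singleton]
      rintro (h | rfl)
      · exact hdisj y (by simp [hy]) h
      · exact (List.nodup_cons.mp hnd).1 hy

-- folding the mapped list over Set.add is the map of the fold, for g injective on the elements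
theorem foldl_add_map (g : Int → Int) (l : List Int) : ∀ (acc : List Int),
    (∀ a, (a ∈ acc ∨ a ∈ l) → ∀ b, (b ∈ acc ∨ b ∈ l) → g a = g b → a = b) →
    List.foldl PySem.Set.add (acc.map g) (l.map g) = (List.foldl PySem.Set.add acc l).map g := by
  induction l with
  | nil => intro acc _; simp
  | cons x t ih =>
    intro acc hg
    simp only [List.map_cons, List.foldl_cons]
    have hadd : PySem.Set.add (acc.map g) (g x) = (PySem.Set.add acc x).map g := by
      by_cases hx : x ∈ acc
      · have h1 : PySem.Set.add acc x = acc := by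
          simp [PySem.Set.add, PySem.Set.contains, hx]
        have h2 : PySem.Set.add (acc.map g) (g x) = acc.map g := by
          simp only [PySem.Set.add, PySem.Set.contains, List.contains_eq_mem, List.mem_map]
          rw [if_pos (by exact decide_eq_true ⟨x, hx, rfl⟩)]
        rw [h1, h2]
      · have h1 : PySem.Set.add acc x = acc ++ [x] := by
          simp [PySem.Set.add, PySem.Set.contains, hx]
        have h2 : PySem.Set.add (acc.map g) (g x) = acc.map g ++ [g x] := by
          simp only [PySem.Set.add, PySem.Set.contains, List.contains_eq_mem, List.mem_map]
          rw [if_neg]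
          simp only [decide_eq_true_eq, not_exists, not_and]
          rintro a ha hga
          exact hx (hg a (Or.inl ha) x (Or.inr (by simp)) hga ▸ ha)
        rw [h1, h2]
        simp
    rw [hadd, ih (PySem.Set.add acc x)]
    intro a ha b hb
    apply hg
    · rcases ha with ha | ha
      · rcases (PySem.Set.mem_add acc x a).mp ha with h | rfl
        · exact Or.inl h
        · exact Or.inr (by simp)
      · exact Or.inr (by simp [ha])
    · rcases hb with hb | hb
      · rcases (PySem.Set.mem_add acc x b).mp hb with h | rfl
        · exact Or.inl h
        · exact Or.inr (by simp)
      · exact Or.inr (by simp [hb])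

-- frozenset(g(v) for v in frozenset(l)) = frozenset(g(v) for v in l), for g injective on l
theorem ofList_map_ofList (l : List Int) (g : Int → Int)
    (hg : ∀ a ∈ l, ∀ b ∈ l, g a = g b → a = b) :
    PySem.Set.ofList ((PySem.Set.ofList l).map g) = PySem.Set.ofList (l.map g) := by
  have hs : (PySem.Set.ofList l).Nodup := PySem.Set.nodup_ofList l
  have hsub : ∀ a ∈ PySem.Set.ofList l, a ∈ l := fun a ha => (PySem.Set.mem_ofList l a).mp ha
  have hmapnd : ((PySem.Set.ofList l).map g).Nodup :=
    List.Nodup.map_on (fun a ha b hb => hg a (hsub a ha) b (hsub b hb)) hs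
  have h1 : PySem.Set.ofList ((PySem.Set.ofList l).map g) = (PySem.Set.ofList l).map g := by
    have := foldl_add_nodup ((PySem.Set.ofList l).map g) [] hmapnd (by simp)
    simpa [PySem.Set.ofList, PySem.Set.empty] using this
  have h2 : PySem.Set.ofList (l.map g) = (PySem.Set.ofList l).map g := by
    have := foldl_add_map g l [] (by
      intro a ha b hb
      exact hg a (ha.resolve_left (by simp)) b (hb.resolve_left (by simp)))
    simpa [PySem.Set.ofList, PySem.Set.empty] using this
  rw [h1, h2]

-- applying h, injective on [0,6), elementwise to a frozenset image of c under f (valued in [0,6))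
theorem gen_S (c : List Int) (f h g : Int → Int)
    (hb : ∀ i, 0 ≤ f i ∧ f i < 6)
    (hinj : ∀ a b, 0 ≤ a → a < 6 → 0 ≤ b → b < 6 → h a = h b → a = b)
    (hfg : ∀ i, h (f i) = g i) :
    PySem.Set.ofList ((PySem.Set.ofList (c.map f)).map h) = PySem.Set.ofList (c.map g) := by
  rw [ofList_map_ofList (c.map f) h ?_]
  · congr 1
    rw [List.map_map]
    exact List.map_congr_left (fun a _ => hfg a)
  · intro a ha b hb'
    simp only [List.mem_map] at ha hb'
    obtain ⟨i, _, rfl⟩ := ha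
    obtain ⟨j, _, rfl⟩ := hb'
    exact hinj _ _ (hb i).1 (hb i).2 (hb j).1 (hb j).2

-- ===== VERDICT (by name: the statement is the Claim_ definition above) =====
theorem get_orbit_spec : Claim_equal_get_orbit := by
  intro c _
  unfold Spec_get_orbit
  have hpos : (0:Int) < 6 := by norm_num
  have hbnd : ∀ (f : Int → Int) (i : Int),
      0 ≤ PySem.Int.mod (f i) 6 ∧ PySem.Int.mod (f i) 6 < 6 :=
    fun f i => ⟨PySem.Int.mod_nonneg _ hpos, PySem.Int.mod_lt _ hpos⟩
  have hinjrot : ∀ a b : Int, 0 ≤ a → a < 6 → 0 ≤ b → b < 6 →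
      PySem.Int.mod (a + 1) 6 = PySem.Int.mod (b + 1) 6 → a = b := by
    intro a b ha1 ha2 hb1 hb2 h
    simp only [PySem.Int.mod_eq_emod_of_pos hpos] at h
    omega
  have hinjneg : ∀ a b : Int, 0 ≤ a → a < 6 → 0 ≤ b → b < 6 →
      PySem.Int.mod (-a) 6 = PySem.Int.mod (-b) 6 → a = b := by
    intro a b ha1 ha2 hb1 hb2 h
    simp only [PySem.Int.mod_eq_emod_of_pos hpos] at h
    omega
  have ey : PySem.Set.ofList ((PySem.Set.ofList (c.map (fun i => PySem.Int.mod i 6))).map (fun v => PySem.Int.mod (-v) 6))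
      = PySem.Set.ofList (c.map (fun i => PySem.Int.mod (-i) 6)) :=
    gen_S c _ _ _ (hbnd (fun i => i)) hinjneg (fun i => by
      simp only [PySem.Int.mod_eq_emod_of_pos hpos]; omega)
  have ex0 : pvRotate (PySem.Set.ofList (c.map (fun i => PySem.Int.mod i 6)))
      = PySem.Set.ofList (c.map (fun i => PySem.Int.mod (i + 1) 6)) := by
    unfold pvRotate
    exact gen_S c _ _ _ (hbnd (fun i => i)) hinjrot (fun i => by
      simp only [PySem.Int.mod_eq_emod_of_pos hpos]; omega)
  have ex1 : pvRotate (PySem.Set.ofList (c.map (fun i => PySem.Int.mod (i + 1) 6)))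
      = PySem.Set.ofList (c.map (fun i => PySem.Int.mod (i + 2) 6)) := by
    unfold pvRotate
    exact gen_S c _ _ _ (hbnd (fun i => i + 1)) hinjrot (fun i => by
      simp only [PySem.Int.mod_eq_emod_of_pos hpos]; omega)
  have ex2 : pvRotate (PySem.Set.ofList (c.map (fun i => PySem.Int.mod (i + 2) 6)))
      = PySem.Set.ofList (c.map (fun i => PySem.Int.mod (i + 3) 6)) := by
    unfold pvRotate
    exact gen_S c _ _ _ (hbnd (fun i => i + 2)) hinjrot (fun i => by
      simp only [PySem.Int.mod_eq_emod_of_pos hpos]; omega)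
  have ex3 : pvRotate (PySem.Set.ofList (c.map (fun i => PySem.Int.mod (i + 3) 6)))
      = PySem.Set.ofList (c.map (fun i => PySem.Int.mod (i + 4) 6)) := by
    unfold pvRotate
    exact gen_S c _ _ _ (hbnd (fun i => i + 3)) hinjrot (fun i => by
      simp only [PySem.Int.mod_eq_emod_of_pos hpos]; omega)
  have ex4 : pvRotate (PySem.Set.ofList (c.map (fun i => PySem.Int.mod (i + 4) 6)))
      = PySem.Set.ofList (c.map (fun i => PySem.Int.mod (i + 5) 6)) := by
    unfold pvRotate
    exact gen_S c _ _ _ (hbnd (fun i => i + 4)) hinjrot (fun i => by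
      simp only [PySem.Int.mod_eq_emod_of_pos hpos]; omega)
  have er0 : pvRotate (PySem.Set.ofList (c.map (fun i => PySem.Int.mod (-i) 6)))
      = PySem.Set.ofList (c.map (fun i => PySem.Int.mod (-i + 1) 6)) := by
    unfold pvRotate
    exact gen_S c _ _ _ (hbnd (fun i => -i)) hinjrot (fun i => by
      simp only [PySem.Int.mod_eq_emod_of_pos hpos]; omega)
  have er1 : pvRotate (PySem.Set.ofList (c.map (fun i => PySem.Int.mod (-i + 1) 6)))
      = PySem.Set.ofList (c.map (fun i => PySem.Int.mod (-i + 2) 6)) := by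
    unfold pvRotate
    exact gen_S c _ _ _ (hbnd (fun i => -i + 1)) hinjrot (fun i => by
      simp only [PySem.Int.mod_eq_emod_of_pos hpos]; omega)
  have er2 : pvRotate (PySem.Set.ofList (c.map (fun i => PySem.Int.mod (-i + 2) 6)))
      = PySem.Set.ofList (c.map (fun i => PySem.Int.mod (-i + 3) 6)) := by
    unfold pvRotate
    exact gen_S c _ _ _ (hbnd (fun i => -i + 2)) hinjrot (fun i => by
      simp only [PySem.Int.mod_eq_emod_of_pos hpos]; omega)
  have er3 : pvRotate (PySem.Set.ofList (c.map (fun i => PySem.Int.mod (-i + 3) 6)))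
      = PySem.Set.ofList (c.map (fun i => PySem.Int.mod (-i + 4) 6)) := by
    unfold pvRotate
    exact gen_S c _ _ _ (hbnd (fun i => -i + 3)) hinjrot (fun i => by
      simp only [PySem.Int.mod_eq_emod_of_pos hpos]; omega)
  have er4 : pvRotate (PySem.Set.ofList (c.map (fun i => PySem.Int.mod (-i + 4) 6)))
      = PySem.Set.ofList (c.map (fun i => PySem.Int.mod (-i + 5) 6)) := by
    unfold pvRotate
    exact gen_S c _ _ _ (hbnd (fun i => -i + 4)) hinjrot (fun i => by
      simp only [PySem.Int.mod_eq_emod_of_pos hpos]; omega)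
  have h6 : PySem.List.pyRange 0 6 1 = [0, 1, 2, 3, 4, 5] := by decide
  unfold get_orbit get_orbit_alt
  rw [h6]
  simp only [List.foldl, add_zero]
  rw [ey, ex0, ex1, ex2, ex3, ex4, er0, er1, er2, er3, er4]
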